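-- pv_equiv track=rewrite | github.com/SaaLongo/progettoCrittografia | src/main/HRCipher.py | stringToNumbers
-- ===== SOURCE A (Python) =====
-- deltaHR = 56
--
-- def stringToNumbers(string):
--     outputValue = []
--     finalValue = 1
--     for character in string:
--         number = ord(character) - deltaHR
--         outputValue.append(number)
--
--     for index in range (1,len(outputValue)-1):
--         finalValue = outputValue[index] * finalValue
--
--     print (finalValue)
--     return finalValue
-- ===== SOURCE B (Python) =====
-- def stringToNumbers(string):
--     # One streaming pass with a one-step delayed factor: skip the first
--     # character, then multiply in each factor only once a following
--     # character arrives, so the last character's factor is never used.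
--     finalValue = 1
--     pending = None
--     it = iter(string)
--     next(it, None)  # skip the first character
--     for character in it:
--         if pending is not None:
--             finalValue *= pending
--         pending = ord(character) - 56
--     print(finalValue)
--     return finalValue
-- ===== Notes on version B (the rewrite author's own statement) =====
-- stated objective: alternative
-- what changed: B replaces A's two staged passes (build a full number list, then multiply over index range(1,len-1)) with one streaming pass carrying a one-step-delayed pending factor, so no list, slice or index arithmetic exists and the first/last characters are excluded by the skip/delay mechanism itself.
import Mathlib
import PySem

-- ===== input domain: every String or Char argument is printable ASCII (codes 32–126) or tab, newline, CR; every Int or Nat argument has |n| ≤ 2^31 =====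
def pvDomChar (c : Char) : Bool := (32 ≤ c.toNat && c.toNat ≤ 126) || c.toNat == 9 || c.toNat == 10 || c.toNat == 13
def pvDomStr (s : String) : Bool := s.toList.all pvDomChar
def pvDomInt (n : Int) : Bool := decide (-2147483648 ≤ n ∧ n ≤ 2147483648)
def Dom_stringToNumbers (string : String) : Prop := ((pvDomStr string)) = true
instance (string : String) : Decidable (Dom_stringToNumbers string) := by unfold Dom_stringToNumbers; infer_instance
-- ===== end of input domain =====

-- B streams once over the characters with a one-step delayed pending factor instead of A's
-- list-build pass plus index-range product pass (alternative decomposition);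
-- both Pythons print finalValue before returning — the equivalence proved is about the return value.

-- ===== PORT A =====
-- first loop of A: build outputValue by appending ord(character) - 56 for each character
def pvOutputValue (cs : List Char) : List Int :=
  cs.foldl (fun acc c => acc ++ [(c.toNat : Int) - 56]) []

-- second loop of A: for index in range(1, len(outputValue)-1): finalValue = outputValue[index] * finalValue
def pvSecondLoop (outputValue : List Int) : Int :=
  (PySem.List.pyRange 1 ((outputValue.length : Int) - 1) 1).foldl
    (fun finalValue index => PySem.List.pyGetD outputValue index 0 * finalValue) 1

def stringToNumbers (string : String) : Int :=
  pvSecondLoop (pvOutputValue string.toList)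

-- ===== PORT B =====
-- B's loop body: multiply in the pending factor (if any), then stash this character's factor
def pvStep (s : Int × Option Int) (c : Char) : Int × Option Int :=
  (match s.2 with
   | none => s.1
   | some p => s.1 * p,
   some ((c.toNat : Int) - 56))

-- next(it, None) skips the first character; the for-loop consumes the rest
def stringToNumbers_alt (string : String) : Int :=
  ((string.toList.drop 1).foldl pvStep (1, none)).1

-- ===== PRECONDITION & SPEC =====
def Spec_stringToNumbers (string : String) (out : Int) : Prop := out = stringToNumbers_alt string
instance (string : String) (out : Int) : Decidable (Spec_stringToNumbers string out) := by unfold Spec_stringToNumbers; infer_instance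

-- ===== CLAIM (what is proved, stated in full; the proofs are below) =====
def Claim_equal_stringToNumbers : Prop := ∀ (string : String), Dom_stringToNumbers string → Spec_stringToNumbers string (stringToNumbers string)

-- ===== LEMMAS AND PROOFS =====

-- the append-loop of A builds exactly the mapped list
theorem pv_build_map (cs : List Char) :
    pvOutputValue cs = cs.map (fun c : Char => (c.toNat : Int) - 56) := by
  unfold pvOutputValue
  simpa using PySem.List.foldl_append_singleton_eq_map (fun c : Char => (c.toNat : Int) - 56) cs

-- A's second loop over range(a, b) multiplies up the drop/take segment of vs
theorem pv_range_fold_prod (vs : List Int) (a b : Nat) (hb : b ≤ vs.length) (c : Int) :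
    (PySem.List.pyRange (a : Int) (b : Int) 1).foldl
        (fun finalValue i => PySem.List.pyGetD vs i 0 * finalValue) c =
      ((vs.drop a).take (b - a)).prod * c := by
  by_cases hab : a < b
  · have hcons : (PySem.List.pyRange (a : Int) (b : Int) 1) =
        (a : Int) :: PySem.List.pyRange ((a : Int) + 1) (b : Int) 1 :=
      PySem.List.pyRange_one_cons (by exact_mod_cast hab)
    have ha : a < vs.length := lt_of_lt_of_le hab hb
    have hsucc : ((a : Int) + 1) = ((a + 1 : Nat) : Int) := by push_cast; ring
    rw [hcons, List.foldl_cons, hsucc,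
        pv_range_fold_prod vs (a + 1) b hb,
        PySem.List.pyGetD_natCast vs a 0, List.getD_eq_getElem vs 0 ha]
    have hdrop : vs.drop a = vs[a] :: vs.drop (a + 1) := List.drop_eq_getElem_cons ha
    have hba : b - a = (b - (a + 1)) + 1 := by omega
    rw [hdrop, hba, List.take_succ_cons, List.prod_cons]
    ring
  · rw [PySem.List.pyRange]
    have hba : ¬ ((a : Int) < (b : Int)) := by exact_mod_cast hab
    simp [hba, Nat.sub_eq_zero_of_le (Nat.le_of_not_lt hab)]
termination_by b - a

-- B's delayed fold with a pending factor p multiplies p and all but the last element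
theorem pv_fold_pending (l : List Char) (f p : Int) :
    (l.foldl pvStep (f, some p)).1 =
      if l = [] then f
      else p * (l.dropLast.map (fun c : Char => (c.toNat : Int) - 56)).prod * f := by
  induction l generalizing f p with
  | nil => simp
  | cons c xs ih =>
    rw [List.foldl_cons]
    show (xs.foldl pvStep (f * p, some ((c.toNat : Int) - 56))).1 = _
    rw [ih]
    rcases eq_or_ne xs ([] : List Char) with rfl | hne
    · simp [mul_comm]
    · simp [hne, List.dropLast_cons_of_ne_nil hne]
      ring

-- B's delayed fold started with no pending factor multiplies all but the last element
theorem pv_fold_none (l : List Char) (f : Int) :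
    (l.foldl pvStep (f, none)).1 =
      (l.dropLast.map (fun c : Char => (c.toNat : Int) - 56)).prod * f := by
  cases l with
  | nil => simp
  | cons c xs =>
    rw [List.foldl_cons]
    show (xs.foldl pvStep (f, some ((c.toNat : Int) - 56))).1 = _
    rw [pv_fold_pending]
    rcases eq_or_ne xs ([] : List Char) with rfl | hne
    · simp
    · simp [hne, List.dropLast_cons_of_ne_nil hne]

-- ===== VERDICT (by name: the statement is the Claim_ definition above) =====
theorem stringToNumbers_spec : Claim_equal_stringToNumbers := by
  intro string _
  unfold Spec_stringToNumbers stringToNumbers stringToNumbers_alt pvSecondLoop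
  rw [pv_build_map, pv_fold_none]
  generalize string.toList = cs
  have hlen : (cs.map (fun c : Char => (c.toNat : Int) - 56)).length = cs.length :=
    List.length_map ..
  rcases Nat.eq_zero_or_pos cs.length with h0 | hpos
  · obtain rfl : cs = [] := List.eq_nil_of_length_eq_zero h0
    simp [PySem.List.pyRange]
  · have hcast : ((cs.length : Int) - 1) = ((cs.length - 1 : Nat) : Int) := by
      push_cast [hpos]; omega
    have h := pv_range_fold_prod (cs.map (fun c : Char => (c.toNat : Int) - 56)) 1
      (cs.length - 1) (by rw [hlen]; omega) 1
    push_cast at h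
    rw [hlen, hcast, h]
    have : (cs.drop 1).dropLast = (cs.drop 1).take (cs.length - 1 - 1) := by
      rw [List.dropLast_eq_take, List.length_drop]
    rw [← List.map_drop, ← List.map_take, ← this, List.map_dropLast, List.map_drop]
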